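-- pv_equiv track=rewrite | github.com/SsyHow/Codeforces2 | 1151a/main.py | check
-- ===== SOURCE A (Python) =====
-- def check(t, u):
--     if t == u:
--         return 0, 0
--
--     a = b = 0
--     k1 = t
--     while t != u:
--         t += 1
--         t %= 26
--         a += 1
--     while k1 != u:
--         k1 -= 1
--         k1 %= 26
--         b += 1
--     return a, b
-- ===== SOURCE B (Python) =====
-- def check(t, u):
--     return (u - t) % 26, (t - u) % 26
-- ===== Notes on version B (the rewrite author's own statement) =====
-- stated objective: simpler
-- what changed: Replaces both counting while-loops (and the t==u guard) with the closed-form modular distances ((u-t)%26, (t-u)%26).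
-- intended difference: On inputs with t != u but t congruent to u mod 26 (only reachable with t outside 0..25), A walks a full circle and returns 26 for both counts; B returns 0 for both, the intended step count between identical letters mod 26. — e.g. on check(26, 0): A returns (26, 26), B returns (0, 0)
import Mathlib
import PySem

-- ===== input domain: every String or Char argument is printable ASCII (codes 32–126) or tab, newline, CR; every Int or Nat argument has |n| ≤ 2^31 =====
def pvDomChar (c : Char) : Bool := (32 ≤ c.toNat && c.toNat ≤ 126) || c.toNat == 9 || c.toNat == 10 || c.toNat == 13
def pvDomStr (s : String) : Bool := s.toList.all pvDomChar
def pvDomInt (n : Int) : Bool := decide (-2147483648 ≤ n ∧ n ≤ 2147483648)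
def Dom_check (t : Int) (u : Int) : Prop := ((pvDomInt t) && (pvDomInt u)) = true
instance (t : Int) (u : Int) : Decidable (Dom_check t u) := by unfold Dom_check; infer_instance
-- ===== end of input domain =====

-- B replaces A's two counting while-loops with the closed-form modular distances; equal on the
-- letter domain, with one stated difference on t ≡ u (mod 26), t ≠ u (see D_check).

-- ===== PORT A =====
-- first while-loop: while t != u: t += 1; t %= 26; a += 1   (fuel 30 suffices on Pre_check)
def incLoop (fuel : Nat) (t u a : Int) : Int :=
  match fuel with
  | 0 => a
  | f + 1 => if t = u then a else incLoop f (PySem.Int.mod (t + 1) 26) u (a + 1)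

-- second while-loop: while k1 != u: k1 -= 1; k1 %= 26; b += 1
def decLoop (fuel : Nat) (k1 u b : Int) : Int :=
  match fuel with
  | 0 => b
  | f + 1 => if k1 = u then b else decLoop f (PySem.Int.mod (k1 - 1) 26) u (b + 1)

def check (t : Int) (u : Int) : Int × Int :=
  if t = u then (0, 0)
  else (incLoop 30 t u 0, decLoop 30 t u 0)

-- ===== PORT B =====
def check_alt (t : Int) (u : Int) : Int × Int :=
  (PySem.Int.mod (u - t) 26, PySem.Int.mod (t - u) 26)

-- ===== PRECONDITION & SPEC =====
-- Pre_check excludes exactly the inputs on which A's while-loops never terminate: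
-- u outside the letter-index range 0..25 with t ≠ u.
def Pre_check (t : Int) (u : Int) : Prop := (0 ≤ u ∧ u < 26) ∨ t = u
instance (t : Int) (u : Int) : Decidable (Pre_check t u) := by unfold Pre_check; infer_instance
def pvWitness_check : Int × Int := (3, 7)

-- On inputs with t ≠ u but t congruent to u mod 26 (only reachable with t outside 0..25), A walks a
-- full circle and returns 26 for both counts; B returns 0 for both, the intended step count between
-- identical letters mod 26.
def D_check (t : Int) (u : Int) : Prop := t ≠ u ∧ (u - t) % 26 = 0
instance (t : Int) (u : Int) : Decidable (D_check t u) := by unfold D_check; infer_instance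

def Spec_check (t : Int) (u : Int) (out : Int × Int) : Prop := ¬ D_check t u → out = check_alt t u
instance (t : Int) (u : Int) (out : Int × Int) : Decidable (Spec_check t u out) := by unfold Spec_check; infer_instance

def pvDiffWitness_check : Int × Int := (26, 0)
def pvDiffWitnessOut_check : (Int × Int) × (Int × Int) := ((26, 26), (0, 0))

-- ===== CLAIM (what is proved, stated in full; the proofs are below) =====
def Claim_unchanged_check : Prop := ∀ (t : Int) (u : Int), Dom_check t u → Pre_check t u → Spec_check t u (check t u)
def Claim_changed_check : Prop := Dom_check (pvDiffWitness_check.1) (pvDiffWitness_check.2) ∧ Pre_check (pvDiffWitness_check.1) (pvDiffWitness_check.2) ∧ D_check (pvDiffWitness_check.1) (pvDiffWitness_check.2) ∧ check (pvDiffWitness_check.1) (pvDiffWitness_check.2) = pvDiffWitnessOut_check.1 ∧ check_alt (pvDiffWitness_check.1) (pvDiffWitness_check.2) = pvDiffWitnessOut_check.2 ∧ pvDiffWitnessOut_check.1 ≠ pvDiffWitnessOut_check.2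
def Claim_exact_check : Prop := ∀ (t : Int) (u : Int), Dom_check t u → Pre_check t u → D_check t u → check t u ≠ check_alt t u

-- ===== LEMMAS AND PROOFS =====

theorem mod26 (a : Int) : PySem.Int.mod a 26 = a % 26 :=
  PySem.Int.mod_eq_emod_of_pos (by norm_num)

theorem incLoop_succ (f : Nat) (t u a : Int) :
    incLoop (f + 1) t u a = if t = u then a else incLoop f (PySem.Int.mod (t + 1) 26) u (a + 1) := rfl

theorem decLoop_succ (f : Nat) (k1 u b : Int) :
    decLoop (f + 1) k1 u b = if k1 = u then b else decLoop f (PySem.Int.mod (k1 - 1) 26) u (b + 1) := rfl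

theorem incLoop_self (f : Nat) (u a : Int) : incLoop f u u a = a := by
  cases f <;> simp [incLoop]

theorem decLoop_self (f : Nat) (u b : Int) : decLoop f u u b = b := by
  cases f <;> simp [decLoop]

-- loop invariant on normalised state 0 ≤ t < 26
theorem incLoop_eq (f : Nat) (t u a : Int) (hu0 : 0 ≤ u) (hu : u < 26)
    (ht0 : 0 ≤ t) (ht : t < 26) (hne : t ≠ u)
    (hf : ((u - t) % 26).toNat ≤ f) :
    incLoop f t u a = a + (u - t) % 26 := by
  induction f generalizing t a with
  | zero => omega
  | succ f ih =>
    rw [incLoop_succ, if_neg hne, mod26]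
    by_cases h' : (t + 1) % 26 = u
    · rw [h', incLoop_self]; omega
    · rw [ih ((t + 1) % 26) (a + 1) (by omega) (by omega) h' (by omega)]
      omega

theorem decLoop_eq (f : Nat) (k u b : Int) (hu0 : 0 ≤ u) (hu : u < 26)
    (hk0 : 0 ≤ k) (hk : k < 26) (hne : k ≠ u)
    (hf : ((k - u) % 26).toNat ≤ f) :
    decLoop f k u b = b + (k - u) % 26 := by
  induction f generalizing k b with
  | zero => omega
  | succ f ih =>
    rw [decLoop_succ, if_neg hne, mod26]
    by_cases h' : (k - 1) % 26 = u
    · rw [h', decLoop_self]; omega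
    · rw [ih ((k - 1) % 26) (b + 1) (by omega) (by omega) h' (by omega)]
      omega

-- entry lemmas: arbitrary starting t (one step normalises it into 0..25)
theorem incLoop_closed (t u : Int) (hu0 : 0 ≤ u) (hu : u < 26) (hne : t ≠ u) :
    incLoop 30 t u 0 = if (u - t) % 26 = 0 then 26 else (u - t) % 26 := by
  rw [show (30 : Nat) = 29 + 1 from rfl, incLoop_succ, if_neg hne, mod26]
  by_cases h' : (t + 1) % 26 = u
  · rw [h', incLoop_self]
    have : (u - t) % 26 = 1 := by omega
    simp [this]
  · rw [incLoop_eq 29 _ u _ hu0 hu (by omega) (by omega) h' (by omega)]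
    split_ifs with h0 <;> omega

theorem decLoop_closed (t u : Int) (hu0 : 0 ≤ u) (hu : u < 26) (hne : t ≠ u) :
    decLoop 30 t u 0 = if (t - u) % 26 = 0 then 26 else (t - u) % 26 := by
  rw [show (30 : Nat) = 29 + 1 from rfl, decLoop_succ, if_neg hne, mod26]
  by_cases h' : (t - 1) % 26 = u
  · rw [h', decLoop_self]
    have : (t - u) % 26 = 1 := by omega
    simp [this]
  · rw [decLoop_eq 29 _ u _ hu0 hu (by omega) (by omega) h' (by omega)]
    split_ifs with h0 <;> omega

-- ===== VERDICT (by name: the statement is the Claim_ definition above) =====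
theorem check_spec : Claim_unchanged_check := by
  intro t u _ hpre hnd
  by_cases heq : t = u
  · subst heq; simp [check, check_alt]
  · have hu : 0 ≤ u ∧ u < 26 := by cases hpre with
      | inl h => exact h
      | inr h => exact absurd h heq
    have hd : (u - t) % 26 ≠ 0 := by
      intro h; exact hnd ⟨heq, h⟩
    simp only [check, if_neg heq, check_alt, mod26,
      incLoop_closed t u hu.1 hu.2 heq, decLoop_closed t u hu.1 hu.2 heq]
    rw [if_neg hd, if_neg (by omega : ¬ (t - u) % 26 = 0)]

theorem check_changed : Claim_changed_check := by unfold Claim_changed_check; decide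

theorem check_tight : Claim_exact_check := by
  intro t u _ hpre hd
  obtain ⟨hne, h0⟩ := hd
  have hu : 0 ≤ u ∧ u < 26 := by cases hpre with
    | inl h => exact h
    | inr h => exact absurd h hne
  simp only [check, if_neg hne, check_alt, mod26,
    incLoop_closed t u hu.1 hu.2 hne, decLoop_closed t u hu.1 hu.2 hne]
  rw [if_pos h0, if_pos (by omega : (t - u) % 26 = 0)]
  intro h
  have := congrArg Prod.fst h
  simp at this
  omega
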